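-- pv_equiv track=rewrite | github.com/redpanda-ai/ctci | solutions/robot_in_a_grid.py | rig
-- ===== SOURCE A (Python) =====
-- from collections import deque
-- from collections import namedtuple
--
-- FORBIDDEN = 1
--
-- def rig(grid):
--     lim_y = len(grid)
--     lim_x = len(grid[0])
--
--     State = namedtuple('State', 'x y path')
--     start_state = State(0, 0, [])
--     goal_state = State(lim_x - 1, lim_y - 1, None)
--     open_states = deque([start_state])
--     while open_states:
--         s = open_states.popleft()
--         _x, _y = s.x + 1, s.y + 1
--         if s.x == goal_state.x and s.y == goal_state.y:
--             return s.path
--         if _x < lim_x and grid[s.y][_x] is not FORBIDDEN: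
--             open_states.append(State(_x, s.y, s.path + ["R"]))
--         if _y < lim_y and grid[_y][s.x] is not FORBIDDEN:
--             open_states.append(State(s.x, _y, s.path + ["D"]))
--
--     return None
-- ===== SOURCE B (Python) =====
-- FORBIDDEN = 1
--
-- def rig(grid):
--     lim_y = len(grid)
--     lim_x = len(grid[0])
--     # backward reachability DP: reach[y][x] iff the goal cell is reachable
--     # from (x, y) moving only right/down, entering non-forbidden cells only
--     reach = []
--     below = [False] * lim_x
--     for y in range(lim_y - 1, -1, -1):
--         row = [False] * lim_x
--         for x in range(lim_x - 1, -1, -1):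
--             if x == lim_x - 1 and y == lim_y - 1:
--                 row[x] = True
--             else:
--                 row[x] = ((x + 1 < lim_x and grid[y][x + 1] != FORBIDDEN and row[x + 1])
--                           or (y + 1 < lim_y and grid[y + 1][x] != FORBIDDEN and below[x]))
--         reach.insert(0, row)
--         below = row
--     if not reach[0][0]:
--         return None
--     # greedy forward walk preferring "R": yields the first path A's BFS would pop
--     path = []
--     x, y = 0, 0
--     while not (x == lim_x - 1 and y == lim_y - 1):
--         if x + 1 < lim_x and grid[y][x + 1] != FORBIDDEN and reach[y][x + 1]:
--             path.append("R")
--             x += 1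
--         else:
--             path.append("D")
--             y += 1
--     return path
-- ===== Notes on version B (the rewrite author's own statement) =====
-- stated objective: faster
-- what changed: Replaces A's breadth-first search that materialises every right/down path state (exponentially many) with an O(X*Y) backward-reachability DP table followed by a greedy forward walk preferring R over D, which produces exactly the first path A's BFS would pop.
-- outside the precondition, e.g. on rig([]): A raises IndexError, B raises IndexError; on rig([[]]): A returns None, B raises IndexError; on rig([[0, 1], [1]]): A returns None, B raises IndexError
import Mathlib
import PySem

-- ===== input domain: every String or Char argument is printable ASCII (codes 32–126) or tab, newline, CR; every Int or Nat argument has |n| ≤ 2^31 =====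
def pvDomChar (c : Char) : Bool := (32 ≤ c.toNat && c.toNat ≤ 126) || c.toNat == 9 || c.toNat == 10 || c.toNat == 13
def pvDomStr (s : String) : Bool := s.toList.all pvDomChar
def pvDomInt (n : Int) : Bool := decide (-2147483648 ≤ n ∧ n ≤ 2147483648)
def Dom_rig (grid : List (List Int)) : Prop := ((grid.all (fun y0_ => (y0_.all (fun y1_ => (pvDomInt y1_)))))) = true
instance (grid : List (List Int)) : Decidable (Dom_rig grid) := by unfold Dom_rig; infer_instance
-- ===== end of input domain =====

-- B replaces A's exponential BFS over all right/down path states by an O(X*Y)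
-- backward-reachability DP plus a greedy forward walk preferring "R" (faster, asymptotic).

-- ===== PORT A =====
-- A's BFS loop. The queue holds (x, y, path) states; coordinates are the Python
-- ints, always ≥ 0 here, so Nat is exact; grid indices are in range under Pre_rig,
-- so List.getD is exact there. The fuel argument only makes the recursion total:
-- it is proved sufficient under Pre_rig (Python's loop terminates because x+y
-- grows along every enqueue and the number of R/D path states is finite).
def rigLoop (grid : List (List Int)) (limx limy : Nat) :
    Nat → List (Nat × Nat × List String) → Option (List String)
  | _, [] => none
  | 0, _ :: _ => none       -- fuel exhausted: never reached under Pre_rig (proved below)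
  | fuel + 1, (x, y, p) :: rest =>
    if x = limx - 1 ∧ y = limy - 1 then some p
    else
      let q1 := if x + 1 < limx ∧ (grid.getD y []).getD (x + 1) 0 ≠ 1
                then rest ++ [(x + 1, y, p ++ ["R"])] else rest
      let q2 := if y + 1 < limy ∧ (grid.getD (y + 1) []).getD x 0 ≠ 1
                then q1 ++ [(x, y + 1, p ++ ["D"])] else q1
      rigLoop grid limx limy fuel q2

def rig (grid : List (List Int)) : Option (List String) :=
  let limy := grid.length
  let limx := (grid.headD []).length   -- len(grid[0]): Pre_rig gives grid ≠ []
  rigLoop grid limx limy (3 ^ (limx + limy)) [(0, 0, [])]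

-- ===== PORT B =====
-- inner loop of the DP: builds reach-row y right-to-left; `acc` holds the cells
-- x+1 .. limx-1 already set (so row[x+1] is acc.headD), `below` is row y+1
def rigRowGo (grid : List (List Int)) (limx limy y : Nat) (below : List Bool) :
    Nat → List Bool → List Bool
  | 0, acc => acc
  | n + 1, acc =>
    rigRowGo grid limx limy y below n
      ((if n = limx - 1 ∧ y = limy - 1 then true
        else ((decide (n + 1 < limx) && decide ((grid.getD y []).getD (n + 1) 0 ≠ 1)
                 && acc.headD false)
           || (decide (y + 1 < limy) && decide ((grid.getD (y + 1) []).getD n 0 ≠ 1)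
                 && below.getD n false))) :: acc)

def rigRow (grid : List (List Int)) (limx limy y : Nat) (below : List Bool) : List Bool :=
  rigRowGo grid limx limy y below limx []

-- outer loop of the DP, y from limy-1 down to 0; after k iterations the state is
-- (below = last computed row, reach = rows limy-k .. limy-1 in order)
def rigRowsGo (grid : List (List Int)) (limx limy : Nat) : Nat → List Bool × List (List Bool)
  | 0 => (List.replicate limx false, [])
  | k + 1 =>
    let s := rigRowsGo grid limx limy k
    let row := rigRow grid limx limy (limy - 1 - k) s.1
    (row, row :: s.2)

-- the greedy while-loop; fuel limx+limy only makes it total (Python's loop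
-- terminates because reach[0][0] guarantees a move at every non-goal cell)
def rigWalk (grid : List (List Int)) (limx limy : Nat) (reach : List (List Bool)) :
    Nat → Nat → Nat → List String → List String
  | 0, _, _, path => path   -- fuel exhausted: never reached when reach[0][0] holds (proved below)
  | f + 1, x, y, path =>
    if x = limx - 1 ∧ y = limy - 1 then path
    else if x + 1 < limx ∧ (grid.getD y []).getD (x + 1) 0 ≠ 1
              ∧ (reach.getD y []).getD (x + 1) false = true
         then rigWalk grid limx limy reach f (x + 1) y (path ++ ["R"])
         else rigWalk grid limx limy reach f x (y + 1) (path ++ ["D"])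

def rig_alt (grid : List (List Int)) : Option (List String) :=
  let limy := grid.length
  let limx := (grid.headD []).length
  let reach := (rigRowsGo grid limx limy limy).2
  if (reach.getD 0 []).getD 0 false = false then none
  else some (rigWalk grid limx limy reach (limx + limy) 0 0 [])

-- ===== PRECONDITION & SPEC =====
-- Pre_rig excludes empty, zero-width and ragged grids (a row shorter than row 0):
-- on those A either raises IndexError, or — when its search dies before touching a
-- missing cell, e.g. [[]] or [[0,1],[1]] — returns None while B's DP, which scans
-- every cell, raises IndexError.
def Pre_rig (grid : List (List Int)) : Prop :=
  grid ≠ [] ∧ 1 ≤ (grid.headD []).length ∧ ∀ row ∈ grid, (grid.headD []).length ≤ row.length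
instance (grid : List (List Int)) : Decidable (Pre_rig grid) := by unfold Pre_rig; infer_instance

def pvWitness_rig : List (List Int) := [[0, 0], [1, 0]]

def Spec_rig (grid : List (List Int)) (out : Option (List String)) : Prop := out = rig_alt grid
instance (grid : List (List Int)) (out : Option (List String)) : Decidable (Spec_rig grid out) := by
  unfold Spec_rig; infer_instance

-- ===== CLAIM (what is proved, stated in full; the proofs are below) =====
def Claim_equal_rig : Prop :=
  ∀ (grid : List (List Int)), Dom_rig grid → Pre_rig grid → Spec_rig grid (rig grid)

-- ===== LEMMAS AND PROOFS =====

-- canonical backward reachability: the goal is reachable from (x, y) moving only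
-- right/down, entering non-forbidden cells only (same reads as both ports)
def reachB (grid : List (List Int)) (limx limy x y : Nat) : Bool :=
  if x = limx - 1 ∧ y = limy - 1 then true
  else
    (if _h : x + 1 < limx then
        decide ((grid.getD y []).getD (x + 1) 0 ≠ 1) && reachB grid limx limy (x + 1) y
      else false)
    || (if _h : y + 1 < limy then
        decide ((grid.getD (y + 1) []).getD x 0 ≠ 1) && reachB grid limx limy x (y + 1)
      else false)
termination_by (limx - x) + (limy - y)
decreasing_by all_goals omega

-- the greedy path from (x, y), fuel-driven
def gAux (grid : List (List Int)) (limx limy : Nat) : Nat → Nat → Nat → List String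
  | 0, _, _ => []
  | f + 1, x, y =>
    if x = limx - 1 ∧ y = limy - 1 then []
    else if x + 1 < limx ∧ (grid.getD y []).getD (x + 1) 0 ≠ 1
              ∧ reachB grid limx limy (x + 1) y = true
         then "R" :: gAux grid limx limy f (x + 1) y
         else "D" :: gAux grid limx limy f x (y + 1)

def gPath (grid : List (List Int)) (limx limy x y : Nat) : List String :=
  gAux grid limx limy ((limx - x) + (limy - y)) x y

-- the value A's BFS eventually extracts from a queue state
def bestOf (grid : List (List Int)) (limx limy : Nat) (s : Nat × Nat × List String) :
    Option (List String) :=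
  if reachB grid limx limy s.1 s.2.1 then some (s.2.2 ++ gPath grid limx limy s.1 s.2.1)
  else none

-- BFS potential: number of pops still possible
def phi (limx limy : Nat) (q : List (Nat × Nat × List String)) : Nat :=
  (q.map (fun s => 3 ^ ((limx - 1 - s.1) + (limy - 1 - s.2.1)))).sum

theorem reachB_goal (grid : List (List Int)) (limx limy x y : Nat)
    (hg : x = limx - 1 ∧ y = limy - 1) : reachB grid limx limy x y = true := by
  rw [reachB, if_pos hg]

theorem reachB_not_goal (grid : List (List Int)) (limx limy x y : Nat)
    (hng : ¬(x = limx - 1 ∧ y = limy - 1)) :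
    reachB grid limx limy x y
      = ((decide (x + 1 < limx) && decide ((grid.getD y []).getD (x + 1) 0 ≠ 1)
            && reachB grid limx limy (x + 1) y)
        || (decide (y + 1 < limy) && decide ((grid.getD (y + 1) []).getD x 0 ≠ 1)
            && reachB grid limx limy x (y + 1))) := by
  rw [reachB, if_neg hng]
  by_cases h1 : x + 1 < limx <;> by_cases h2 : y + 1 < limy <;> simp [h1, h2]

theorem reach_D (grid : List (List Int)) (limx limy x y : Nat)
    (hr : reachB grid limx limy x y = true) (hng : ¬(x = limx - 1 ∧ y = limy - 1))
    (hnc : ¬(x + 1 < limx ∧ (grid.getD y []).getD (x + 1) 0 ≠ 1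
            ∧ reachB grid limx limy (x + 1) y = true)) :
    y + 1 < limy ∧ (grid.getD (y + 1) []).getD x 0 ≠ 1
      ∧ reachB grid limx limy x (y + 1) = true := by
  rw [reachB_not_goal grid limx limy x y hng] at hr
  by_cases h1 : x + 1 < limx <;> by_cases h2 : y + 1 < limy <;>
    simp only [h1, h2, decide_true, decide_false, Bool.true_and, Bool.false_and,
      Bool.and_eq_true, Bool.or_eq_true, Bool.false_or, Bool.or_false,
      decide_eq_true_eq] at hr
  · rcases hr with h | h
    · exact absurd ⟨h1, h.1, h.2⟩ hnc
    · exact ⟨h2, h.1, h.2⟩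
  · exact absurd ⟨h1, hr.1, hr.2⟩ hnc
  · exact ⟨h2, hr.1, hr.2⟩
  · exact absurd hr Bool.false_ne_true

theorem gAux_congr (grid : List (List Int)) (limx limy : Nat) :
    ∀ f1 f2 x y, x < limx → y < limy → reachB grid limx limy x y = true →
      (limx - 1 - x) + (limy - 1 - y) < f1 → (limx - 1 - x) + (limy - 1 - y) < f2 →
      gAux grid limx limy f1 x y = gAux grid limx limy f2 x y := by
  intro f1
  induction f1 with
  | zero => intro f2 x y hx hy hr h1 h2; omega
  | succ f ihf =>
    intro f2 x y hx hy hr h1 h2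
    cases f2 with
    | zero => omega
    | succ f2 =>
      simp only [gAux]
      by_cases hg : x = limx - 1 ∧ y = limy - 1
      · rw [if_pos hg, if_pos hg]
      · rw [if_neg hg, if_neg hg]
        by_cases hc : x + 1 < limx ∧ (grid.getD y []).getD (x + 1) 0 ≠ 1
            ∧ reachB grid limx limy (x + 1) y = true
        · rw [if_pos hc, if_pos hc,
            ihf f2 (x + 1) y hc.1 hy hc.2.2 (by omega) (by omega)]
        · have hd := reach_D grid limx limy x y hr hg hc
          rw [if_neg hc, if_neg hc,
            ihf f2 x (y + 1) hx hd.1 hd.2.2 (by omega) (by omega)]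

theorem gPath_goal (grid : List (List Int)) (limx limy x y : Nat)
    (_hx : x < limx) (_hy : y < limy) (hg : x = limx - 1 ∧ y = limy - 1) :
    gPath grid limx limy x y = [] := by
  have h : (limx - x) + (limy - y) = ((limx - x) + (limy - y) - 1) + 1 := by omega
  rw [gPath, h, gAux, if_pos hg]

theorem gPath_R (grid : List (List Int)) (limx limy x y : Nat)
    (_hx : x < limx) (hy : y < limy) (hng : ¬(x = limx - 1 ∧ y = limy - 1))
    (hc : x + 1 < limx ∧ (grid.getD y []).getD (x + 1) 0 ≠ 1
            ∧ reachB grid limx limy (x + 1) y = true) :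
    gPath grid limx limy x y = "R" :: gPath grid limx limy (x + 1) y := by
  have h : (limx - x) + (limy - y) = ((limx - x) + (limy - y) - 1) + 1 := by omega
  rw [gPath, h, gAux, if_neg hng, if_pos hc, gPath]
  exact congrArg _ (gAux_congr grid limx limy _ _ (x + 1) y hc.1 hy hc.2.2
    (by omega) (by omega))

theorem gPath_D (grid : List (List Int)) (limx limy x y : Nat)
    (hx : x < limx) (_hy : y < limy) (hr : reachB grid limx limy x y = true)
    (hng : ¬(x = limx - 1 ∧ y = limy - 1))
    (hnc : ¬(x + 1 < limx ∧ (grid.getD y []).getD (x + 1) 0 ≠ 1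
            ∧ reachB grid limx limy (x + 1) y = true)) :
    gPath grid limx limy x y = "D" :: gPath grid limx limy x (y + 1) := by
  have hd := reach_D grid limx limy x y hr hng hnc
  have h : (limx - x) + (limy - y) = ((limx - x) + (limy - y) - 1) + 1 := by omega
  rw [gPath, h, gAux, if_neg hng, if_neg hnc, gPath]
  exact congrArg _ (gAux_congr grid limx limy _ _ x (y + 1) hx hd.1 hd.2.2
    (by omega) (by omega))

-- ===== B side: the DP table computes reachB, the walk computes gPath =====

theorem rigRowGo_eq (grid : List (List Int)) (limx limy y : Nat) (below : List Bool)
    (hb : y + 1 < limy → ∀ x < limx, below.getD x false = reachB grid limx limy x (y + 1)) :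
    ∀ n, n ≤ limx →
      rigRowGo grid limx limy y below n
          ((List.range' n (limx - n)).map (fun x => reachB grid limx limy x y))
        = (List.range limx).map (fun x => reachB grid limx limy x y) := by
  intro n
  induction n with
  | zero =>
    intro _
    simp [rigRowGo, List.range_eq_range']
  | succ n ih =>
    intro hn
    rw [rigRowGo]
    have hhead : ((List.range' (n + 1) (limx - (n + 1))).map
          (fun x => reachB grid limx limy x y)).headD false
        = (decide (n + 1 < limx) && reachB grid limx limy (n + 1) y) := by
      by_cases h1 : n + 1 < limx
      · have h : limx - (n + 1) = (limx - (n + 2)) + 1 := by omega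
        rw [h, List.range'_succ]
        simp [h1]
      · have h : limx - (n + 1) = 0 := by omega
        rw [h]
        simp [h1, List.range']
    have hc : (if n = limx - 1 ∧ y = limy - 1 then true
        else ((decide (n + 1 < limx) && decide ((grid.getD y []).getD (n + 1) 0 ≠ 1)
                 && ((List.range' (n + 1) (limx - (n + 1))).map
                      (fun x => reachB grid limx limy x y)).headD false)
           || (decide (y + 1 < limy) && decide ((grid.getD (y + 1) []).getD n 0 ≠ 1)
                 && below.getD n false)))
        = reachB grid limx limy n y := by
      by_cases hg : n = limx - 1 ∧ y = limy - 1
      · rw [if_pos hg, reachB_goal grid limx limy n y hg]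
      · rw [if_neg hg, reachB_not_goal grid limx limy n y hg, hhead]
        by_cases h2 : y + 1 < limy
        · rw [hb h2 n (by omega)]
          by_cases h1 : n + 1 < limx <;> simp [h1, h2, Bool.and_comm]
        · by_cases h1 : n + 1 < limx <;> simp [h1, h2, Bool.and_comm]
    rw [hc]
    have hcons : reachB grid limx limy n y
          :: (List.range' (n + 1) (limx - (n + 1))).map (fun x => reachB grid limx limy x y)
        = (List.range' n (limx - n)).map (fun x => reachB grid limx limy x y) := by
      have h : limx - n = (limx - (n + 1)) + 1 := by omega
      rw [h, List.range'_succ]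
      simp
    rw [hcons]
    exact ih (by omega)

theorem rigRowsGo_eq (grid : List (List Int)) (limx limy : Nat) :
    ∀ k, k ≤ limy →
      (rigRowsGo grid limx limy k).2
          = (List.range' (limy - k) k).map
              (fun y => (List.range limx).map (fun x => reachB grid limx limy x y))
        ∧ (0 < k → (rigRowsGo grid limx limy k).1
          = (List.range limx).map (fun x => reachB grid limx limy x (limy - k))) := by
  intro k
  induction k with
  | zero => intro _; exact ⟨by simp [rigRowsGo], by omega⟩
  | succ k ih =>
    intro hk
    obtain ⟨ih2, ih1⟩ := ih (by omega)
    have hrow : rigRow grid limx limy (limy - 1 - k) (rigRowsGo grid limx limy k).1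
        = (List.range limx).map (fun x => reachB grid limx limy x (limy - (k + 1))) := by
      rw [rigRow]
      have hb : (limy - 1 - k) + 1 < limy →
          ∀ x < limx, (rigRowsGo grid limx limy k).1.getD x false
            = reachB grid limx limy x ((limy - 1 - k) + 1) := by
        intro hlt x hx
        have hk0 : 0 < k := by omega
        rw [ih1 hk0, PySem.List.getD_map_range _ _ _ _ hx]
        have h : limy - k = (limy - 1 - k) + 1 := by omega
        rw [h]
      have h := rigRowGo_eq grid limx limy (limy - 1 - k) (rigRowsGo grid limx limy k).1
        hb limx (le_refl _)
      have hnil : limx - limx = 0 := by omega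
      rw [hnil] at h
      simp only [List.range', List.map_nil] at h
      rw [h]
      have hy : limy - 1 - k = limy - (k + 1) := by omega
      rw [hy]
    have hsplit : List.range' (limy - (k + 1)) (k + 1)
        = (limy - (k + 1)) :: List.range' (limy - k) k := by
      rw [List.range'_succ]
      have h : limy - (k + 1) + 1 = limy - k := by omega
      rw [h]
    constructor
    · show (rigRow grid limx limy (limy - 1 - k) (rigRowsGo grid limx limy k).1)
          :: (rigRowsGo grid limx limy k).2 = _
      rw [hrow, ih2, hsplit, List.map_cons]
    · intro _
      show rigRow grid limx limy (limy - 1 - k) (rigRowsGo grid limx limy k).1 = _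
      exact hrow

theorem rigWalk_eq (grid : List (List Int)) (limx limy : Nat)
    (reach : List (List Bool))
    (ht : reach = (List.range' 0 limy).map
        (fun y => (List.range limx).map (fun x => reachB grid limx limy x y))) :
    ∀ f x y path, x < limx → y < limy → reachB grid limx limy x y = true →
      (limx - 1 - x) + (limy - 1 - y) < f →
      rigWalk grid limx limy reach f x y path = path ++ gPath grid limx limy x y := by
  have htab : ∀ x y, x < limx → y < limy →
      (reach.getD y []).getD x false = reachB grid limx limy x y := by
    intro x y hx hy
    rw [ht, ← List.range_eq_range', PySem.List.getD_map_range _ _ _ _ hy,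
      PySem.List.getD_map_range _ _ _ _ hx]
  intro f
  induction f with
  | zero => intro x y path hx hy hr h; omega
  | succ f ih =>
    intro x y path hx hy hr h
    rw [rigWalk]
    by_cases hg : x = limx - 1 ∧ y = limy - 1
    · rw [if_pos hg, gPath_goal grid limx limy x y hx hy hg]
      simp
    · rw [if_neg hg]
      by_cases hc : x + 1 < limx ∧ (grid.getD y []).getD (x + 1) 0 ≠ 1
          ∧ reachB grid limx limy (x + 1) y = true
      · have hc' : x + 1 < limx ∧ (grid.getD y []).getD (x + 1) 0 ≠ 1
            ∧ (reach.getD y []).getD (x + 1) false = true :=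
          ⟨hc.1, hc.2.1, by rw [htab _ _ hc.1 hy]; exact hc.2.2⟩
        rw [if_pos hc', ih (x + 1) y _ hc.1 hy hc.2.2 (by omega),
          gPath_R grid limx limy x y hx hy hg hc]
        simp
      · have hd := reach_D grid limx limy x y hr hg hc
        have hc' : ¬(x + 1 < limx ∧ (grid.getD y []).getD (x + 1) 0 ≠ 1
            ∧ (reach.getD y []).getD (x + 1) false = true) := fun hcc =>
          hc ⟨hcc.1, hcc.2.1, by rw [← htab _ _ hcc.1 hy]; exact hcc.2.2⟩
        rw [if_neg hc', ih x (y + 1) _ hx hd.1 hd.2.2 (by omega),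
          gPath_D grid limx limy x y hx hy hr hg hc]
        simp

-- ===== A side: the BFS invariant =====

theorem phi_nil (limx limy : Nat) (q : List (Nat × Nat × List String))
    (h : phi limx limy q ≤ 0) : q = [] := by
  cases q with
  | nil => rfl
  | cons s t =>
    exfalso
    have h3 : 1 ≤ 3 ^ ((limx - 1 - s.1) + (limy - 1 - s.2.1)) :=
      Nat.one_le_pow _ _ (by norm_num)
    simp only [phi, List.map_cons, List.sum_cons] at h
    omega

theorem bool3_true {a b : Prop} [Decidable a] [Decidable b] {r : Bool}
    (ha : a) (hb : b) (hr : r = true) : (decide a && decide b && r) = true := by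
  rw [decide_eq_true ha, decide_eq_true hb, hr]; rfl

theorem bool3_false_right {a b : Prop} [Decidable a] [Decidable b] {r : Bool}
    (hr : r = false) : (decide a && decide b && r) = false := by
  rw [hr, Bool.and_false]

theorem bool3_false_cond {a b : Prop} [Decidable a] [Decidable b] (r : Bool)
    (h : ¬(a ∧ b)) : (decide a && decide b && r) = false := by
  by_cases ha : a
  · have hb : ¬b := fun hb => h ⟨ha, hb⟩
    rw [decide_eq_false hb, Bool.and_false, Bool.false_and]
  · rw [decide_eq_false ha, Bool.false_and, Bool.false_and]

theorem chfs (grid : List (List Int)) (limx limy x y : Nat) (p : List String)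
    (hx : x < limx) (hy : y < limy) (hng : ¬(x = limx - 1 ∧ y = limy - 1)) :
    (((if x + 1 < limx ∧ (grid.getD y []).getD (x + 1) 0 ≠ 1
          then [(x + 1, y, p ++ ["R"])] else [])
      ++ (if y + 1 < limy ∧ (grid.getD (y + 1) []).getD x 0 ≠ 1
          then [(x, y + 1, p ++ ["D"])] else [])).findSome? (bestOf grid limx limy))
      = bestOf grid limx limy (x, y, p) := by
  by_cases hcR : x + 1 < limx ∧ (grid.getD y []).getD (x + 1) 0 ≠ 1
  · rw [if_pos hcR]
    by_cases hrR : reachB grid limx limy (x + 1) y = true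
    · have hrxy : reachB grid limx limy x y = true := by
        rw [reachB_not_goal grid limx limy x y hng, bool3_true hcR.1 hcR.2 hrR,
          Bool.true_or]
      have hstep := gPath_R grid limx limy x y hx hy hng ⟨hcR.1, hcR.2, hrR⟩
      rw [List.findSome?_append]
      simp [List.findSome?, bestOf, hrR, hrxy, hstep]
    · have hrRf : reachB grid limx limy (x + 1) y = false := by
        rw [← Bool.not_eq_true]; exact hrR
      by_cases hcD : y + 1 < limy ∧ (grid.getD (y + 1) []).getD x 0 ≠ 1
      · rw [if_pos hcD]
        by_cases hrD : reachB grid limx limy x (y + 1) = true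
        · have hrxy : reachB grid limx limy x y = true := by
            rw [reachB_not_goal grid limx limy x y hng, bool3_false_right hrRf,
              Bool.false_or, bool3_true hcD.1 hcD.2 hrD]
          have hstep := gPath_D grid limx limy x y hx hy hrxy hng
            (fun hcc => hrR hcc.2.2)
          rw [List.findSome?_append]
          simp [List.findSome?, bestOf, hrRf, hrD, hrxy, hstep]
        · have hrDf : reachB grid limx limy x (y + 1) = false := by
            rw [← Bool.not_eq_true]; exact hrD
          have hrxy : reachB grid limx limy x y = false := by
            rw [reachB_not_goal grid limx limy x y hng, bool3_false_right hrRf,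
              Bool.false_or, bool3_false_right hrDf]
          rw [List.findSome?_append]
          simp [List.findSome?, bestOf, hrRf, hrDf, hrxy]
      · rw [if_neg hcD]
        have hrxy : reachB grid limx limy x y = false := by
          rw [reachB_not_goal grid limx limy x y hng, bool3_false_right hrRf,
            Bool.false_or, bool3_false_cond _ hcD]
        rw [List.findSome?_append]
        simp [List.findSome?, bestOf, hrRf, hrxy]
  · rw [if_neg hcR]
    by_cases hcD : y + 1 < limy ∧ (grid.getD (y + 1) []).getD x 0 ≠ 1
    · rw [if_pos hcD]
      by_cases hrD : reachB grid limx limy x (y + 1) = true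
      · have hrxy : reachB grid limx limy x y = true := by
          rw [reachB_not_goal grid limx limy x y hng, bool3_false_cond _ hcR,
            Bool.false_or, bool3_true hcD.1 hcD.2 hrD]
        have hstep := gPath_D grid limx limy x y hx hy hrxy hng
          (fun hcc => hcR ⟨hcc.1, hcc.2.1⟩)
        simp [bestOf, hrD, hrxy, hstep]
      · have hrDf : reachB grid limx limy x (y + 1) = false := by
          rw [← Bool.not_eq_true]; exact hrD
        have hrxy : reachB grid limx limy x y = false := by
          rw [reachB_not_goal grid limx limy x y hng, bool3_false_cond _ hcR,
            Bool.false_or, bool3_false_right hrDf]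
        simp [List.findSome?, bestOf, hrDf, hrxy]
    · rw [if_neg hcD]
      have hrxy : reachB grid limx limy x y = false := by
        rw [reachB_not_goal grid limx limy x y hng, bool3_false_cond _ hcR,
          Bool.false_or, bool3_false_cond _ hcD]
      simp [bestOf, hrxy]

theorem rigLoop_eq (grid : List (List Int)) (limx limy : Nat) :
    ∀ fuel (Aq Bq : List (Nat × Nat × List String)) k,
      (∀ s ∈ Aq, s.1 < limx ∧ s.2.1 < limy ∧ s.1 + s.2.1 = k) →
      (∀ s ∈ Bq, s.1 < limx ∧ s.2.1 < limy ∧ s.1 + s.2.1 = k + 1) →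
      phi limx limy (Aq ++ Bq) ≤ fuel →
      rigLoop grid limx limy fuel (Aq ++ Bq)
        = (Bq.findSome? (bestOf grid limx limy)).or (Aq.findSome? (bestOf grid limx limy)) := by
  intro fuel
  induction fuel with
  | zero =>
    intro Aq Bq k hA hB hphi
    have hq : Aq ++ Bq = [] := phi_nil limx limy _ hphi
    have hAnil : Aq = [] := by cases Aq <;> simp_all
    have hBnil : Bq = [] := by cases Bq <;> simp_all
    subst hAnil; subst hBnil
    simp [rigLoop, List.findSome?]
  | succ f ih =>
    have pop : ∀ (x y : Nat) (p : List String) (A' Bq : List (Nat × Nat × List String)) (k : Nat),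
        (∀ s ∈ (x, y, p) :: A', s.1 < limx ∧ s.2.1 < limy ∧ s.1 + s.2.1 = k) →
        (∀ s ∈ Bq, s.1 < limx ∧ s.2.1 < limy ∧ s.1 + s.2.1 = k + 1) →
        phi limx limy (((x, y, p) :: A') ++ Bq) ≤ f + 1 →
        rigLoop grid limx limy (f + 1) (((x, y, p) :: A') ++ Bq)
          = (Bq.findSome? (bestOf grid limx limy)).or
              (((x, y, p) :: A').findSome? (bestOf grid limx limy)) := by
      intro x y p A' Bq k hA hB hphi
      obtain ⟨hx, hy, hk⟩ := hA (x, y, p) List.mem_cons_self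
      replace hx : x < limx := hx
      replace hy : y < limy := hy
      replace hk : x + y = k := hk
      by_cases hg : x = limx - 1 ∧ y = limy - 1
      · have hBnil : Bq = [] := by
          cases Bq with
          | nil => rfl
          | cons b t =>
            exfalso
            obtain ⟨hbx, hby, hbk⟩ := hB b List.mem_cons_self
            replace hbx : b.1 < limx := hbx
            replace hby : b.2.1 < limy := hby
            replace hbk : b.1 + b.2.1 = k + 1 := hbk
            omega
        subst hBnil
        have hreach := reachB_goal grid limx limy x y hg
        have hgp := gPath_goal grid limx limy x y hx hy hg
        have hq : ((x, y, p) :: A') ++ ([] : List (Nat × Nat × List String))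
            = (x, y, p) :: A' := by simp
        rw [hq, rigLoop, if_pos hg]
        have hbs : bestOf grid limx limy (x, y, p) = some p := by
          simp [bestOf, hreach, hgp]
        simp [List.findSome?, hbs]
      · have hstep : rigLoop grid limx limy (f + 1) ((x, y, p) :: (A' ++ Bq))
            = rigLoop grid limx limy f (A' ++ (Bq
              ++ ((if x + 1 < limx ∧ (grid.getD y []).getD (x + 1) 0 ≠ 1
                    then [(x + 1, y, p ++ ["R"])] else [])
                ++ (if y + 1 < limy ∧ (grid.getD (y + 1) []).getD x 0 ≠ 1
                    then [(x, y + 1, p ++ ["D"])] else [])))) := by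
          rw [rigLoop, if_neg hg]
          show rigLoop grid limx limy f
              (if y + 1 < limy ∧ (grid.getD (y + 1) []).getD x 0 ≠ 1
                then (if x + 1 < limx ∧ (grid.getD y []).getD (x + 1) 0 ≠ 1
                    then (A' ++ Bq) ++ [(x + 1, y, p ++ ["R"])] else A' ++ Bq)
                  ++ [(x, y + 1, p ++ ["D"])]
                else (if x + 1 < limx ∧ (grid.getD y []).getD (x + 1) 0 ≠ 1
                    then (A' ++ Bq) ++ [(x + 1, y, p ++ ["R"])] else A' ++ Bq)) = _
          by_cases hcR : x + 1 < limx ∧ (grid.getD y []).getD (x + 1) 0 ≠ 1 <;>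
            by_cases hcD : y + 1 < limy ∧ (grid.getD (y + 1) []).getD x 0 ≠ 1
          · rw [if_pos hcR, if_pos hcD, if_pos hcR, if_pos hcD]
            simp [List.append_assoc]
          · rw [if_pos hcR, if_neg hcD, if_pos hcR, if_neg hcD]
            simp [List.append_assoc]
          · rw [if_neg hcR, if_pos hcD, if_neg hcR, if_pos hcD]
            simp [List.append_assoc]
          · rw [if_neg hcR, if_neg hcD, if_neg hcR, if_neg hcD]
            simp
        have hch : ∀ s ∈ ((if x + 1 < limx ∧ (grid.getD y []).getD (x + 1) 0 ≠ 1
              then [(x + 1, y, p ++ ["R"])] else [])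
            ++ (if y + 1 < limy ∧ (grid.getD (y + 1) []).getD x 0 ≠ 1
              then [(x, y + 1, p ++ ["D"])] else [])),
            s.1 < limx ∧ s.2.1 < limy ∧ s.1 + s.2.1 = k + 1 := by
          intro s hs
          rcases List.mem_append.mp hs with h | h
          · by_cases hcR : x + 1 < limx ∧ (grid.getD y []).getD (x + 1) 0 ≠ 1
            · rw [if_pos hcR] at h
              simp only [List.mem_singleton] at h
              subst h
              refine ⟨hcR.1, hy, ?_⟩
              show x + 1 + y = k + 1
              omega
            · rw [if_neg hcR] at h
              exact absurd h List.not_mem_nil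
          · by_cases hcD : y + 1 < limy ∧ (grid.getD (y + 1) []).getD x 0 ≠ 1
            · rw [if_pos hcD] at h
              simp only [List.mem_singleton] at h
              subst h
              refine ⟨hx, hcD.1, ?_⟩
              show x + (y + 1) = k + 1
              omega
            · rw [if_neg hcD] at h
              exact absurd h List.not_mem_nil
        have hphi' : phi limx limy (A' ++ (Bq
              ++ ((if x + 1 < limx ∧ (grid.getD y []).getD (x + 1) 0 ≠ 1
                    then [(x + 1, y, p ++ ["R"])] else [])
                ++ (if y + 1 < limy ∧ (grid.getD (y + 1) []).getD x 0 ≠ 1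
                    then [(x, y + 1, p ++ ["D"])] else [])))) ≤ f := by
          have h1 : phi limx limy (((x, y, p) :: A') ++ Bq)
              = 3 ^ ((limx - 1 - x) + (limy - 1 - y)) + (phi limx limy A' + phi limx limy Bq) := by
            simp [phi]
          have h3 : phi limx limy ((if x + 1 < limx ∧ (grid.getD y []).getD (x + 1) 0 ≠ 1
                    then [(x + 1, y, p ++ ["R"])] else [])
                ++ (if y + 1 < limy ∧ (grid.getD (y + 1) []).getD x 0 ≠ 1
                    then [(x, y + 1, p ++ ["D"])] else []))
              ≤ 2 * 3 ^ ((limx - 1 - x) + (limy - 1 - y) - 1) := by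
            by_cases hcR : x + 1 < limx ∧ (grid.getD y []).getD (x + 1) 0 ≠ 1 <;>
              by_cases hcD : y + 1 < limy ∧ (grid.getD (y + 1) []).getD x 0 ≠ 1
            · have e1 : (limx - 1 - (x + 1)) + (limy - 1 - y)
                  = (limx - 1 - x) + (limy - 1 - y) - 1 := by omega
              have e2 : (limx - 1 - x) + (limy - 1 - (y + 1))
                  = (limx - 1 - x) + (limy - 1 - y) - 1 := by omega
              rw [if_pos hcR, if_pos hcD]
              simp [phi, e1, e2]
              omega
            · have e1 : (limx - 1 - (x + 1)) + (limy - 1 - y)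
                  = (limx - 1 - x) + (limy - 1 - y) - 1 := by omega
              rw [if_pos hcR, if_neg hcD]
              simp [phi, e1]
            · have e2 : (limx - 1 - x) + (limy - 1 - (y + 1))
                  = (limx - 1 - x) + (limy - 1 - y) - 1 := by omega
              rw [if_neg hcR, if_pos hcD]
              simp [phi, e2]
            · rw [if_neg hcR, if_neg hcD]
              simp [phi]
          have h2 : phi limx limy (A' ++ (Bq
              ++ ((if x + 1 < limx ∧ (grid.getD y []).getD (x + 1) 0 ≠ 1
                    then [(x + 1, y, p ++ ["R"])] else [])
                ++ (if y + 1 < limy ∧ (grid.getD (y + 1) []).getD x 0 ≠ 1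
                    then [(x, y + 1, p ++ ["D"])] else []))))
              = phi limx limy A' + phi limx limy Bq
                + phi limx limy ((if x + 1 < limx ∧ (grid.getD y []).getD (x + 1) 0 ≠ 1
                    then [(x + 1, y, p ++ ["R"])] else [])
                ++ (if y + 1 < limy ∧ (grid.getD (y + 1) []).getD x 0 ≠ 1
                    then [(x, y + 1, p ++ ["D"])] else [])) := by
            simp [phi]
            omega
          have hpow : 3 ^ ((limx - 1 - x) + (limy - 1 - y))
              = 3 * 3 ^ ((limx - 1 - x) + (limy - 1 - y) - 1) := by
            conv_lhs => rw [show (limx - 1 - x) + (limy - 1 - y)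
              = ((limx - 1 - x) + (limy - 1 - y) - 1) + 1 from by omega]
            rw [pow_succ]
            ring
          have hone : 1 ≤ 3 ^ ((limx - 1 - x) + (limy - 1 - y) - 1) :=
            Nat.one_le_pow _ _ (by norm_num)
          rw [h1] at hphi
          omega
        rw [show ((x, y, p) :: A') ++ Bq = (x, y, p) :: (A' ++ Bq) from rfl, hstep,
          ih A' _ k (fun s hs => hA s (List.mem_cons_of_mem _ hs))
            (fun s hs => (List.mem_append.mp hs).elim (hB s) (hch s)) hphi',
          List.findSome?_append, chfs grid limx limy x y p hx hy hg]
        cases hBfs : Bq.findSome? (bestOf grid limx limy) <;>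
          cases hbs : bestOf grid limx limy (x, y, p) <;>
            simp [List.findSome?, hbs]
    intro Aq Bq k hA hB hphi
    cases Aq with
    | cons s A' =>
      obtain ⟨x, y, p⟩ := s
      exact pop x y p A' Bq k hA hB hphi
    | nil =>
      cases Bq with
      | nil => simp [rigLoop, List.findSome?]
      | cons s B' =>
        obtain ⟨x, y, p⟩ := s
        have h := pop x y p B' [] (k + 1) hB
          (fun s hs => absurd hs List.not_mem_nil)
          (by simpa [phi] using hphi)
        simpa using h

-- ===== VERDICT (by name: the statement is the Claim_ definition above) =====
theorem rig_spec : Claim_equal_rig := by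
  intro grid _hdom hpre
  obtain ⟨hne, hx1, _hrect⟩ := hpre
  unfold Spec_rig
  have hy1 : 1 ≤ grid.length := by
    cases grid with
    | nil => exact absurd rfl hne
    | cons a t => simp
  set limy := grid.length with hlimydef
  set limx := (grid.headD []).length with hlimxdef
  have hA0 := rigLoop_eq grid limx limy (3 ^ (limx + limy))
    [((0 : Nat), (0 : Nat), ([] : List String))] [] 0
    (by
      intro s hs
      simp only [List.mem_singleton] at hs
      subst hs
      exact ⟨hx1, hy1, rfl⟩)
    (fun s hs => absurd hs List.not_mem_nil)
    (by
      have h : phi limx limy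
          ([((0 : Nat), (0 : Nat), ([] : List String))] ++ [])
          = 3 ^ ((limx - 1 - 0) + (limy - 1 - 0)) := by
        simp [phi]
      rw [h]
      exact Nat.pow_le_pow_right (by norm_num) (by omega))
  have hArig : rig grid
      = bestOf grid limx limy (0, 0, []) := by
    have hrig : rig grid = rigLoop grid limx limy
        (3 ^ (limx + limy))
        ([((0 : Nat), (0 : Nat), ([] : List String))] ++ []) := rfl
    rw [hrig, hA0]
    cases hbs : bestOf grid limx limy (0, 0, []) <;>
      simp [List.findSome?, hbs]
  have hreach2 : (rigRowsGo grid limx limy limy).2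
      = (List.range' 0 limy).map
          (fun y => (List.range limx).map
            (fun x => reachB grid limx limy x y)) := by
    have h := (rigRowsGo_eq grid limx limy limy (le_refl _)).1
    simpa using h
  have h00 : (((rigRowsGo grid limx limy limy).2.getD 0 []).getD 0 false)
      = reachB grid limx limy 0 0 := by
    rw [hreach2, ← List.range_eq_range',
      PySem.List.getD_map_range _ _ _ _ (by omega),
      PySem.List.getD_map_range _ _ _ _ (by omega)]
  have hBrig : rig_alt grid
      = (if (((rigRowsGo grid limx limy limy).2.getD 0 []).getD 0 false) = false
        then none
        else some (rigWalk grid limx limy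
          (rigRowsGo grid limx limy limy).2
          (limx + limy) 0 0 [])) := rfl
  by_cases hr : reachB grid limx limy 0 0 = true
  · rw [hArig, hBrig, h00, hr, if_neg (by decide)]
    rw [rigWalk_eq grid limx limy _ hreach2
      (limx + limy) 0 0 [] (by omega) (by omega) hr (by omega)]
    simp [bestOf, hr]
  · have hrf : reachB grid limx limy 0 0 = false := by
      rw [← Bool.not_eq_true]; exact hr
    rw [hArig, hBrig, h00, hrf, if_pos rfl]
    simp [bestOf, hrf]
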